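-- pv_equiv track=rewrite | github.com/Wachu75/pyfestival | tydzien_3/zadanie-domowe-3-11.py | searchBracket
-- ===== SOURCE A (Python) =====
-- test = "tego nie ma liczyć(to ma policzyc)(to też)"
--
-- def searchBracket(inputStr):
--     indexStart = 0
--     indexEnd = 0
--     temp = ""
--     output = ""
--     for index, s in enumerate(inputStr):
--         if s == "(": indexStart = index
--
--         if s == ")": indexEnd = index
--
--         temp = (test[indexStart+1:indexEnd])
--
--         output = output + temp
--
--     return len(output)
-- ===== SOURCE B (Python) =====
-- test = "tego nie ma liczyć(to ma policzyc)(to też)"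
--
-- def searchBracket(inputStr):
--     # Event-based: only bracket positions change the slice bounds, so collect
--     # them once and account for each constant run by one multiplication; each
--     # slice's length comes from clamped arithmetic, no string is ever built.
--     L = len(test)
--     n = len(inputStr)
--     total = 0
--     s = 0
--     e = 0
--     contrib = 0
--     prev = 0
--     for i, ch in [(i, c) for i, c in enumerate(inputStr) if c == "(" or c == ")"]:
--         if ch == "(":
--             s = i
--         else:
--             e = i
--         total += (i - prev) * contrib
--         contrib = max(0, min(e, L) - min(s + 1, L))
--         total += contrib
--         prev = i + 1
--     return total + (n - prev) * contrib
-- ===== Notes on version B (the rewrite author's own statement) =====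
-- stated objective: alternative
-- what changed: B collects the bracket positions once and sums run-length times a clamped slice-length formula, instead of slicing the global test string and concatenating strings at every character; no string is ever built.
import Mathlib
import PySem

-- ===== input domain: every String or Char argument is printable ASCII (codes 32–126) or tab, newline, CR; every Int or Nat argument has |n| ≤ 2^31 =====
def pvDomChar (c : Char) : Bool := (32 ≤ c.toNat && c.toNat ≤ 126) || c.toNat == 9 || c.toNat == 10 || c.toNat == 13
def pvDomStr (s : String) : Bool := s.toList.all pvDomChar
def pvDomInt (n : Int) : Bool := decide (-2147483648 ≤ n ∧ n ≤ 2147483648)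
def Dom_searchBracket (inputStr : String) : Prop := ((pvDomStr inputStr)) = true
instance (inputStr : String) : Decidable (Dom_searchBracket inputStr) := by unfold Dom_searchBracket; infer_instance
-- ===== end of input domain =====

-- B collects the bracket positions once and adds run-length × clamped slice-length per
-- constant run, instead of slicing the global `test` string and concatenating at every
-- character (objective: alternative algorithm, no string is built).

-- the module-level global `test` both versions take their slices from
def pvTest : String := "tego nie ma liczyć(to ma policzyc)(to też)"

-- ===== PORT A =====
def searchBracketStepA (st : Int × Int × List Char) (p : Int × Char) : Int × Int × List Char :=
  let indexStart := if p.2 = '(' then p.1 else st.1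
  let indexEnd := if p.2 = ')' then p.1 else st.2.1
  let temp := PySem.List.slice pvTest.toList (some (indexStart + 1)) (some indexEnd)
  (indexStart, indexEnd, st.2.2 ++ temp)

def searchBracket (inputStr : String) : Int :=
  (((PySem.List.enumerate inputStr.toList 0).foldl searchBracketStepA (0, 0, ([] : List Char))).2.2.length : Int)

-- ===== PORT B =====
-- state: (s, e, contrib, prev, total)
def searchBracketStepB (st : Int × Int × Int × Int × Int) (p : Int × Char) : Int × Int × Int × Int × Int :=
  match st with
  | (s, e, contrib, prev, total) =>
    let s' := if p.2 = '(' then p.1 else s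
    let e' := if p.2 = '(' then e else p.1
    let total₁ := total + (p.1 - prev) * contrib
    let contrib' := max 0 (min e' (pvTest.toList.length : Int) - min (s' + 1) (pvTest.toList.length : Int))
    (s', e', contrib', p.1 + 1, total₁ + contrib')

def searchBracket_alt (inputStr : String) : Int :=
  let n : Int := inputStr.toList.length
  let evs := (PySem.List.enumerate inputStr.toList 0).filter (fun p => p.2 == '(' || p.2 == ')')
  let r := evs.foldl searchBracketStepB (0, 0, 0, 0, 0)
  r.2.2.2.2 + (n - r.2.2.2.1) * r.2.2.1

-- ===== PRECONDITION & SPEC =====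
def Spec_searchBracket (inputStr : String) (out : Int) : Prop := out = searchBracket_alt inputStr
instance (inputStr : String) (out : Int) : Decidable (Spec_searchBracket inputStr out) := by unfold Spec_searchBracket; infer_instance

-- ===== CLAIM (what is proved, stated in full; the proofs are below) =====
def Claim_equal_searchBracket : Prop := ∀ (inputStr : String), Dom_searchBracket inputStr → Spec_searchBracket inputStr (searchBracket inputStr)

-- ===== LEMMAS AND PROOFS =====

-- the length of test[s+1:e] as clamped arithmetic (what B adds per position)
lemma pv_slice_len (s e : Int) (hs : 0 ≤ s) (he : 0 ≤ e) :
    ((PySem.List.slice pvTest.toList (some (s + 1)) (some e)).length : Int)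
      = max 0 (min e (pvTest.toList.length : Int) - min (s + 1) (pvTest.toList.length : Int)) := by
  obtain ⟨a, rfl⟩ := Int.eq_ofNat_of_zero_le hs
  obtain ⟨b, rfl⟩ := Int.eq_ofNat_of_zero_le he
  have h1 : ((a : Int) + 1) = ((a + 1 : Nat) : Int) := by push_cast; ring
  rw [h1, PySem.List.length_slice, PySem.List.clampIdx_natCast, PySem.List.clampIdx_natCast]
  push_cast
  omega

-- master invariant: A's per-character accumulation equals B's event/run accounting
lemma pv_master (xs : List Char) :
    ∀ (k s e contrib prev total : Int) (out : List Char),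
    0 ≤ k → 0 ≤ s → 0 ≤ e →
    contrib = max 0 (min e (pvTest.toList.length : Int) - min (s + 1) (pvTest.toList.length : Int)) →
    (out.length : Int) = total + (k - prev) * contrib →
    (((PySem.List.enumerate xs k).foldl searchBracketStepA (s, e, out)).2.2.length : Int)
      = (let r := ((PySem.List.enumerate xs k).filter (fun p => p.2 == '(' || p.2 == ')')).foldl
            searchBracketStepB (s, e, contrib, prev, total);
         r.2.2.2.2 + ((k + xs.length) - r.2.2.2.1) * r.2.2.1) := by
  induction xs with
  | nil =>
    intro k s e contrib prev total out _ _ _ _ hconf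
    simp [PySem.List.enumerate_nil]
    linarith [hconf]
  | cons x xs ih =>
    intro k s e contrib prev total out hk hs he hc hconf
    rw [PySem.List.enumerate_cons]
    by_cases hbr : (x == '(' || x == ')') = true
    · -- bracket: the event is consumed by B's fold
      simp only [List.foldl_cons, List.filter_cons, hbr, if_pos]
      have hsplit : x = '(' ∨ x = ')' := by
        rcases Bool.or_eq_true_iff.mp hbr with h | h
        · exact Or.inl (by simpa using h)
        · exact Or.inr (by simpa using h)
      set s' : Int := if x = '(' then k else s with hs'def
      set e' : Int := if x = '(' then e else k with he'def
      have hsA : (if x = '(' then k else s) = s' := rfl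
      have heA : (if x = ')' then k else e) = e' := by
        rcases hsplit with h | h <;> simp [h, he'def]
      have hs' : 0 ≤ s' := by rw [hs'def]; split <;> assumption
      have he' : 0 ≤ e' := by rw [he'def]; split <;> assumption
      have hstepA : searchBracketStepA (s, e, out) (k, x)
          = (s', e', out ++ PySem.List.slice pvTest.toList (some (s' + 1)) (some e')) := by
        simp [searchBracketStepA, hsA, heA]
      have hstepB : searchBracketStepB (s, e, contrib, prev, total) (k, x)
          = (s', e',
             max 0 (min e' (pvTest.toList.length : Int) - min (s' + 1) (pvTest.toList.length : Int)),
             k + 1,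
             (total + (k - prev) * contrib)
               + max 0 (min e' (pvTest.toList.length : Int) - min (s' + 1) (pvTest.toList.length : Int))) := by
        simp [searchBracketStepB, hs'def, he'def]
      rw [hstepA, hstepB]
      have hlen := pv_slice_len s' e' hs' he'
      have := ih (k + 1) s' e'
        (max 0 (min e' (pvTest.toList.length : Int) - min (s' + 1) (pvTest.toList.length : Int)))
        (k + 1)
        ((total + (k - prev) * contrib)
          + max 0 (min e' (pvTest.toList.length : Int) - min (s' + 1) (pvTest.toList.length : Int)))
        (out ++ PySem.List.slice pvTest.toList (some (s' + 1)) (some e'))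
        (by omega) hs' he' rfl
        (by push_cast [List.length_append]; rw [hlen]; push_cast [hconf]; ring)
      rw [this]
      simp only [List.length_cons]
      push_cast
      ring
    · -- not a bracket: state unchanged, B's filter drops it
      have hx1 : ¬ x = '(' := by
        intro h; apply hbr; simp [h]
      have hx2 : ¬ x = ')' := by
        intro h; apply hbr; simp [h]
      simp only [List.foldl_cons, List.filter_cons, hbr, if_neg, Bool.false_eq_true,
        not_false_eq_true]
      have hstepA : searchBracketStepA (s, e, out) (k, x)
          = (s, e, out ++ PySem.List.slice pvTest.toList (some (s + 1)) (some e)) := by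
        simp [searchBracketStepA, hx1, hx2]
      rw [hstepA]
      have hlen := pv_slice_len s e hs he
      have := ih (k + 1) s e contrib prev total
        (out ++ PySem.List.slice pvTest.toList (some (s + 1)) (some e))
        (by omega) hs he hc
        (by push_cast [List.length_append]; rw [hlen, ← hc, hconf]; ring)
      rw [this]
      simp only [List.length_cons]
      push_cast
      ring

-- ===== VERDICT (by name: the statement is the Claim_ definition above) =====
theorem searchBracket_spec : Claim_equal_searchBracket := by
  intro inputStr _
  unfold Spec_searchBracket searchBracket searchBracket_alt
  have := pv_master inputStr.toList 0 0 0 0 0 0 [] le_rfl le_rfl le_rfl (by decide) (by simp)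
  simpa using this
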